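-- pv_equiv track=rewrite | github.com/Mets3D/mets-nodes | mega_prompt.py | unroll_tag_stack
-- ===== SOURCE A (Python) =====
-- def unroll_tag_stack(prompt: str, tag_stack: dict[str, str]) -> str:
--     tag_names = list(tag_stack.keys())
--     def present_tags(prompt):
--         return {tag for tag in tag_names if f'<{tag}>' in prompt}
--     def unroll_tag(prompt, tag):
--         return prompt.replace(f'<{tag}>', tag_stack[tag])
--
--     tags_to_unroll = present_tags(prompt)
--     while tags_to_unroll:
--         for tag in tags_to_unroll:
--             prompt = unroll_tag(prompt, tag)
--         tags_to_unroll = present_tags(prompt)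
--
--     return prompt
-- ===== SOURCE B (Python) =====
-- def unroll_tag_stack(prompt: str, tag_stack: dict[str, str]) -> str:
--     # Recursive per-tag expansion instead of A's global rescan-to-fixpoint rounds:
--     # full(tag) fully expands one tag's replacement text (recursing into the tags
--     # it mentions), and the prompt is rewritten in a single pass over the tags.
--     def full(tag):
--         s = tag_stack[tag]
--         for t in tag_stack:
--             pat = '<' + t + '>'
--             if pat in s:
--                 s = s.replace(pat, full(t))
--         return s
--     out = prompt
--     for t in tag_stack:
--         pat = '<' + t + '>'
--         if pat in out:
--             out = out.replace(pat, full(t))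
--     return out
-- ===== Notes on version B (the rewrite author's own statement) =====
-- stated objective: alternative
-- what changed: A repeatedly rescans the whole prompt to a fixpoint (recompute the set of present tags, replace each, loop); B recursively expands each tag's replacement text once (depth-first over the tag definitions) and rewrites the prompt in a single pass over the tags.
-- outside the precondition, e.g. on unroll_tag_stack('<a>', {'a': '<a>'}): A does not finish within the time limit, B raises RecursionError; on unroll_tag_stack('<<k>c>', {'abc': 'Z', 'k': 'ab'}): A returns 'Z', B returns '<abc>'
import Mathlib
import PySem

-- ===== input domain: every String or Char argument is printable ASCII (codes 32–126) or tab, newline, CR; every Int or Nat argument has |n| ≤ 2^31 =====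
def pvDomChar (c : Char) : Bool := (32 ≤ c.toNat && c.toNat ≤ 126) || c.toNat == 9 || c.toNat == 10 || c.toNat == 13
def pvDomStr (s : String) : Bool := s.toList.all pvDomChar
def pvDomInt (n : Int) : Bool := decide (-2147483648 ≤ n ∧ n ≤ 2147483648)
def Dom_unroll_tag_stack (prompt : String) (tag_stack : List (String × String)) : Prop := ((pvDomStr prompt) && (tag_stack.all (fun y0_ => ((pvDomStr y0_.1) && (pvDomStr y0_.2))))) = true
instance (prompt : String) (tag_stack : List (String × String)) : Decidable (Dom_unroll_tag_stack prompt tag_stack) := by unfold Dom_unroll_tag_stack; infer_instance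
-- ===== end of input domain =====

-- B replaces A's rescan-to-fixpoint rounds over the whole prompt by a recursive
-- per-tag expansion of each replacement text plus a single substitution pass over
-- the prompt (a different algorithm of similar cost).

-- ===== PORT A =====
-- f'<{tag}>'
def pvPatS (t : String) : String := "<" ++ t ++ ">"
-- list(tag_stack.keys())  (the assoc list models the dict: first occurrence of a key is its binding)
def pvKeys (l : List (String × String)) : List String := PySem.List.dedup (l.map Prod.fst)
-- tag_stack[tag]; at every use site tag ∈ keys, so the KeyError branch (getD "") is unreachable
def pvLookup (l : List (String × String)) (t : String) : String :=
  ((l.find? (fun p => p.1 == t)).map Prod.snd).getD ""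
-- {tag for tag in tag_names if f'<{tag}>' in prompt}; iteration order of this set is
-- PySem.Set's (first-occurrence) order — under Pre_ the loop's result does not depend on it
def pvPresentTags (names : List String) (s : String) : List String :=
  PySem.Set.ofList (names.filter (fun t => PySem.Str.isIn (pvPatS t) s))
-- the while loop; the fuel guard (tag count + 1) is unreachable under Pre_
def pvLoopA (l : List (String × String)) (names : List String) : Nat → String → String
  | 0, s => s
  | fuel+1, s =>
    let ts := pvPresentTags names s
    if ts.isEmpty then s
    else pvLoopA l names fuel (ts.foldl (fun s t => PySem.Str.replace s (pvPatS t) (pvLookup l t)) s)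

def unroll_tag_stack (prompt : String) (tag_stack : List (String × String)) : String :=
  pvLoopA tag_stack (pvKeys tag_stack) (tag_stack.length + 1) prompt

-- ===== PORT B =====
-- def full(tag): s = tag_stack[tag]; for t in tag_stack: if pat in s: s = s.replace(pat, full(t)); return s
-- (the Nat argument is a recursion-depth guard, never reached under Pre_'s acyclicity)
def pvFull (l : List (String × String)) : Nat → String → String
  | 0, tag => pvLookup l tag
  | f+1, tag =>
    (pvKeys l).foldl
      (fun s t => if PySem.Str.isIn (pvPatS t) s then PySem.Str.replace s (pvPatS t) (pvFull l f t) else s)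
      (pvLookup l tag)

def unroll_tag_stack_alt (prompt : String) (tag_stack : List (String × String)) : String :=
  (pvKeys tag_stack).foldl
    (fun s t => if PySem.Str.isIn (pvPatS t) s then PySem.Str.replace s (pvPatS t) (pvFull tag_stack (tag_stack.length + 1) t) else s)
    prompt

-- ===== PRECONDITION & SPEC =====
-- pvWfB s: every '<' in s opens a complete '<name>' group whose name has no '<'/'>'
-- (stray '>' characters are allowed; pvWfP consumes such a name).
mutual
def pvWfB : List Char → Bool
  | [] => true
  | c :: r => if c = '<' then pvWfP r else pvWfB r
def pvWfP : List Char → Bool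
  | [] => false
  | c :: r => if c = '>' then pvWfB r else if c = '<' then false else pvWfP r
end

-- fuel-bounded rank of a tag in the dependency graph (tag t depends on u when
-- '<u>' occurs in t's value); isSome = the definitions reachable from t are acyclic
def pvDeps (l : List (String × String)) (t : String) : List String :=
  (pvKeys l).filter (fun u => PySem.Str.isIn (pvPatS u) (pvLookup l t))

def pvRankB (l : List (String × String)) : Nat → String → Option Nat
  | 0, _ => none
  | f+1, t =>
    (pvDeps l t).foldr
      (fun u acc => match pvRankB l f u, acc with
        | some r, some m => some (max (r+1) m)
        | _, _ => none) (some 0)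

-- Pre_ excludes cyclic tag definitions (A's while loop never terminates) and inputs where
-- some tag pattern occurs in the prompt while the prompt, a tag name or a value carries a
-- stray '<'/'>' outside complete '<name>' groups (or keys are duplicated): there replacement
-- can glue new tag patterns together across boundaries, so A's value depends on Python's
-- randomized set-iteration order or on such accidental cascades.
def Pre_unroll_tag_stack (prompt : String) (tag_stack : List (String × String)) : Prop :=
  (∀ p ∈ tag_stack, ¬ ('<' :: p.1.toList ++ ['>']) <:+: prompt.toList)
  ∨ ((tag_stack.map Prod.fst).Nodup
      ∧ (∀ p ∈ tag_stack, '<' ∉ p.1.toList ∧ '>' ∉ p.1.toList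
           ∧ pvWfB p.2.toList = true
           ∧ (pvRankB tag_stack (tag_stack.length + 1) p.1).isSome = true)
      ∧ pvWfB prompt.toList = true)

instance (prompt : String) (tag_stack : List (String × String)) : Decidable (Pre_unroll_tag_stack prompt tag_stack) := by
  unfold Pre_unroll_tag_stack; infer_instance

def pvWitness_unroll_tag_stack : String × (List (String × String)) :=
  ("hi <a>, bye <b c>!", [("a", "x<b c>y"), ("b c", "Z")])

def Spec_unroll_tag_stack (prompt : String) (tag_stack : List (String × String)) (out : String) : Prop :=
  out = unroll_tag_stack_alt prompt tag_stack

instance (prompt : String) (tag_stack : List (String × String)) (out : String) : Decidable (Spec_unroll_tag_stack prompt tag_stack out) := by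
  unfold Spec_unroll_tag_stack; infer_instance

-- ===== CLAIM =====
def Claim_equal_unroll_tag_stack : Prop :=
  ∀ (prompt : String) (tag_stack : List (String × String)),
    Dom_unroll_tag_stack prompt tag_stack → Pre_unroll_tag_stack prompt tag_stack →
    Spec_unroll_tag_stack prompt tag_stack (unroll_tag_stack prompt tag_stack)

-- ===== LEMMAS AND PROOFS =====

-- the pattern at the character level
def pvPatC (t : String) : List Char := '<' :: t.toList ++ ['>']

theorem pvPatS_toList (t : String) : (pvPatS t).toList = pvPatC t := by
  simp [pvPatS, pvPatC]

-- characters-level replace (Python str.replace), recursion on the string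
def pvRepl (old new : List Char) : List Char → List Char
  | [] => []
  | c :: t =>
    if old.isPrefixOf (c :: t) then new ++ pvRepl old new (List.drop (old.length - 1) t)
    else c :: pvRepl old new t
termination_by l => l.length
decreasing_by all_goals first | (simp; omega) | simp

theorem pvRepl_cons (old new : List Char) (c : Char) (t : List Char) :
    pvRepl old new (c :: t) =
      if old.isPrefixOf (c :: t) then new ++ pvRepl old new (List.drop (old.length - 1) t)
      else c :: pvRepl old new t := by
  rw [pvRepl]

theorem pvGo_eq (old new : List Char) (h : old ≠ []) :
    ∀ f l acc, l.length ≤ f → PySem.Chars.replace.go old new f l acc = acc.reverse ++ pvRepl old new l := by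
  intro f
  induction f with
  | zero =>
    intro l acc hl
    have : l = [] := List.eq_nil_of_length_eq_zero (Nat.le_zero.mp hl)
    subst this
    rw [PySem.Chars.replace.go]
    simp [pvRepl]
  | succ f ih =>
    intro l acc hl
    cases l with
    | nil =>
      rw [PySem.Chars.replace.go]
      · simp [pvRepl]
      · omega
    | cons c t =>
      rw [PySem.Chars.replace.go]
      by_cases hp : old.isPrefixOf (c :: t)
      · simp only [hp, if_true]
        have hol : 1 ≤ old.length := by
          cases old with | nil => exact absurd rfl h | cons a b => simp
        have hlen : (List.drop old.length (c :: t)).length ≤ f := by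
          simp at hl ⊢; omega
        rw [ih _ _ hlen, pvRepl_cons, if_pos hp]
        have : List.drop old.length (c :: t) = List.drop (old.length - 1) t := by
          cases old with
          | nil => exact absurd rfl h
          | cons a b => simp
        rw [this]; simp
      · simp only [hp, if_false]
        have hlen : t.length ≤ f := by simp at hl; omega
        rw [ih _ _ hlen, pvRepl_cons, if_neg hp]
        simp

theorem pvReplace_eq (old new s : List Char) (h : old ≠ []) :
    PySem.Chars.replace s old new = pvRepl old new s := by
  have : old.isEmpty = false := by cases old with | nil => exact absurd rfl h | cons a b => simp
  rw [PySem.Chars.replace, this]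
  simpa using pvGo_eq old new h s.length s [] (le_refl _)

theorem pvReplace_toList (s v : String) (t : String) :
    (PySem.Str.replace s (pvPatS t) v).toList = pvRepl (pvPatC t) v.toList s.toList := by
  have h1 : (PySem.Str.replace s (pvPatS t) v).toList
      = PySem.Chars.replace s.toList (pvPatS t).toList v.toList := by simp
  rw [h1, pvPatS_toList, pvReplace_eq _ _ _ (by simp [pvPatC])]

-- well-formed strings: every '<' opens a complete bracket-free-name group
inductive PvWf : List Char → Prop
  | nil : PvWf []
  | chr {c : Char} {s : List Char} : c ≠ '<' → PvWf s → PvWf (c :: s)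
  | pie {w s : List Char} : (∀ c ∈ w, c ≠ '<' ∧ c ≠ '>') → PvWf s → PvWf ('<' :: (w ++ '>' :: s))

theorem pvWfP_split {r : List Char} (h : pvWfP r = true) :
    ∃ w s, r = w ++ '>' :: s ∧ (∀ c ∈ w, c ≠ '<' ∧ c ≠ '>') ∧ pvWfB s = true := by
  induction r with
  | nil => rw [pvWfP] at h; exact absurd h (by simp)
  | cons c r ih =>
    rw [pvWfP] at h
    by_cases h1 : c = '>'
    · subst h1
      simp only [if_pos rfl] at h
      exact ⟨[], r, by simp, by simp, h⟩
    · by_cases h2 : c = '<'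
      · rw [if_neg h1, if_pos h2] at h; exact absurd h (by simp)
      · rw [if_neg h1, if_neg h2] at h
        obtain ⟨w, s, hr, hw, hs⟩ := ih h
        exact ⟨c :: w, s, by simp [hr], by
          intro d hd
          rcases List.mem_cons.mp hd with h3 | h3
          · exact h3 ▸ ⟨h2, h1⟩
          · exact hw d h3, hs⟩

theorem pvWfB_wf {s : List Char} (h : pvWfB s = true) : PvWf s := by
  induction hn : s.length using Nat.strong_induction_on generalizing s with
  | _ k ihk =>
  subst hn
  cases s with
  | nil => exact PvWf.nil
  | cons c t =>
    rw [pvWfB] at h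
    by_cases h2 : c = '<'
    · subst h2
      rw [if_pos rfl] at h
      obtain ⟨w, s', hr, hw, hs⟩ := pvWfP_split h
      subst hr
      refine PvWf.pie hw (ihk s'.length (by simp; omega) hs rfl)
    · rw [if_neg h2] at h
      exact PvWf.chr h2 (ihk t.length (by simp) h rfl)


-- bracket-free character lists (tag names, name parts of groups)
def pvBF (w : List Char) : Prop := ∀ c ∈ w, c ≠ '<' ∧ c ≠ '>'

-- the normal form: simultaneous recursive expansion of the given patterns
def pvEf (pats : List (List Char × List Char)) : Nat → List Char → List Char
  | _, [] => []
  | 0, c :: t => c :: t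
  | f+1, c :: t =>
    match pats.find? (fun q => q.1.isPrefixOf (c :: t)) with
    | some q => pvEf pats f q.2 ++ pvEf pats (f+1) ((c :: t).drop (q.1.length.max 1))
    | none => c :: pvEf pats (f+1) t
termination_by f s => (f, s.length)
decreasing_by
  all_goals first
    | exact Prod.Lex.left _ _ (Nat.lt_succ_self f)
    | (apply Prod.Lex.right; simp; omega)
    | (apply Prod.Lex.right; simp)

theorem pvEf_zero (pats : List (List Char × List Char)) (s : List Char) :
    pvEf pats 0 s = s := by
  cases s <;> rw [pvEf]

theorem pvEf_nil (pats : List (List Char × List Char)) (f : Nat) :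
    pvEf pats f [] = [] := by
  cases f <;> rw [pvEf]

-- which patterns can be prefixes where
theorem pvPatPrefix {n w : List Char} (hn : pvBF n) (hw : pvBF w) (s : List Char) :
    ('<' :: n ++ ['>']) <+: ('<' :: (w ++ '>' :: s)) ↔ n = w := by
  constructor
  · intro hp
    simp only [List.cons_append] at hp
    rw [List.cons_prefix_cons] at hp
    have hp2 := hp.2
    clear hp
    induction n generalizing w with
    | nil =>
      cases w with
      | nil => rfl
      | cons d w' =>
        simp only [List.nil_append, List.cons_append, List.cons_prefix_cons] at hp2
        exact absurd hp2.1.symm (hw d (by simp)).2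
    | cons a n' ihn =>
      cases w with
      | nil =>
        simp only [List.cons_append, List.nil_append, List.cons_prefix_cons] at hp2
        exact absurd hp2.1 (hn a (by simp)).2
      | cons d w' =>
        simp only [List.cons_append, List.cons_prefix_cons] at hp2
        have := ihn (fun c hc => hn c (List.mem_cons_of_mem _ hc))
          (w := w') (fun c hc => hw c (List.mem_cons_of_mem _ hc)) hp2.2
        rw [hp2.1, this]
  · rintro rfl
    simp only [List.cons_append]
    rw [List.cons_prefix_cons]
    exact ⟨rfl, by simp⟩

theorem pvNoPrefix_head {x s : List Char} {c : Char} (hc : c ≠ '<') :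
    ¬ ('<' :: x) <+: (c :: s) := by
  intro h
  rw [List.cons_prefix_cons] at h
  exact hc h.1.symm

theorem pvFind_chr {pats : List (List Char × List Char)}
    (G1 : ∀ q ∈ pats, ∃ n, q.1 = '<' :: n ++ ['>'] ∧ pvBF n)
    {c : Char} {t : List Char} (hc : c ≠ '<') :
    pats.find? (fun q => q.1.isPrefixOf (c :: t)) = none := by
  rw [List.find?_eq_none]
  intro q hq
  obtain ⟨n, hq1, _⟩ := G1 q hq
  simp only [Bool.not_eq_true, ← Bool.not_eq_true, List.isPrefixOf_iff_prefix, hq1,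
    List.cons_append]
  intro hp
  exact pvNoPrefix_head hc hp

theorem pvFind_hit {pats : List (List Char × List Char)}
    (G1 : ∀ q ∈ pats, ∃ n, q.1 = '<' :: n ++ ['>'] ∧ pvBF n)
    (G2 : (pats.map Prod.fst).Nodup)
    {w v s : List Char} (hw : pvBF w) (hmem : ('<' :: w ++ ['>'], v) ∈ pats) :
    pats.find? (fun q => q.1.isPrefixOf ('<' :: (w ++ '>' :: s))) = some ('<' :: w ++ ['>'], v) := by
  induction pats with
  | nil => simp at hmem
  | cons q0 rest ih =>
    by_cases hq : q0.1.isPrefixOf ('<' :: (w ++ '>' :: s))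
    · rw [List.find?_cons_of_pos (by simpa using hq)]
      obtain ⟨n0, h01, h02⟩ := G1 q0 (List.mem_cons_self ..)
      have hpre : q0.1 <+: ('<' :: (w ++ '>' :: s)) := by
        rwa [List.isPrefixOf_iff_prefix] at hq
      rw [h01] at hpre
      have hn0 : n0 = w := (pvPatPrefix h02 hw s).mp hpre
      have hfst : q0.1 = '<' :: w ++ ['>'] := by rw [h01, hn0]
      rcases List.mem_cons.mp hmem with hcase | hcase
      · rw [← hcase]
      · exfalso
        simp only [List.map_cons, List.nodup_cons] at G2
        exact G2.1 (hfst ▸ List.mem_map.mpr ⟨_, hcase, rfl⟩)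
    · rw [List.find?_cons_of_neg (by simpa using hq)]
      have hne : ('<' :: w ++ ['>'], v) ≠ q0 := by
        intro hcontra
        apply hq
        rw [← hcontra]
        rw [List.isPrefixOf_iff_prefix]
        exact (pvPatPrefix hw hw s).mpr rfl
      have hmem' : ('<' :: w ++ ['>'], v) ∈ rest := by
        rcases List.mem_cons.mp hmem with hcase | hcase
        · exact absurd hcase hne
        · exact hcase
      refine ih (fun q hq2 => G1 q (List.mem_cons_of_mem _ hq2)) ?_ hmem'
      simp only [List.map_cons, List.nodup_cons] at G2
      exact G2.2

theorem pvFind_miss {pats : List (List Char × List Char)}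
    (G1 : ∀ q ∈ pats, ∃ n, q.1 = '<' :: n ++ ['>'] ∧ pvBF n)
    {w s : List Char} (hw : pvBF w) (hno : ∀ q ∈ pats, q.1 ≠ '<' :: w ++ ['>']) :
    pats.find? (fun q => q.1.isPrefixOf ('<' :: (w ++ '>' :: s))) = none := by
  rw [List.find?_eq_none]
  intro q hq
  obtain ⟨n, hq1, hq2⟩ := G1 q hq
  simp only [Bool.not_eq_true, ← Bool.not_eq_true, List.isPrefixOf_iff_prefix]
  intro hp
  rw [hq1] at hp
  have := (pvPatPrefix hq2 hw s).mp hp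
  exact hno q hq (by rw [hq1, this])

theorem pvEf_chr {pats : List (List Char × List Char)}
    (G1 : ∀ q ∈ pats, ∃ n, q.1 = '<' :: n ++ ['>'] ∧ pvBF n)
    {c : Char} (hc : c ≠ '<') (f : Nat) (t : List Char) :
    pvEf pats (f+1) (c :: t) = c :: pvEf pats (f+1) t := by
  rw [pvEf, pvFind_chr G1 hc]

theorem pvEf_chrs {pats : List (List Char × List Char)}
    (G1 : ∀ q ∈ pats, ∃ n, q.1 = '<' :: n ++ ['>'] ∧ pvBF n)
    {a : List Char} (ha : ∀ c ∈ a, c ≠ '<') (f : Nat) (r : List Char) :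
    pvEf pats (f+1) (a ++ r) = a ++ pvEf pats (f+1) r := by
  induction a with
  | nil => simp
  | cons c a' ih =>
    simp only [List.cons_append]
    rw [pvEf_chr G1 (ha c (by simp)), ih (fun c hc => ha c (List.mem_cons_of_mem _ hc))]

theorem pvEf_piece_hit {pats : List (List Char × List Char)}
    (G1 : ∀ q ∈ pats, ∃ n, q.1 = '<' :: n ++ ['>'] ∧ pvBF n)
    (G2 : (pats.map Prod.fst).Nodup)
    {w v : List Char} (hw : pvBF w) (hmem : ('<' :: w ++ ['>'], v) ∈ pats) (f : Nat) (s : List Char) :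
    pvEf pats (f+1) ('<' :: (w ++ '>' :: s)) = pvEf pats f v ++ pvEf pats (f+1) s := by
  rw [pvEf, pvFind_hit G1 G2 hw hmem]
  have h1 : ('<' :: w ++ ['>']).length.max 1 = w.length + 2 := by
    simp only [List.cons_append, List.length_cons, List.length_append, List.length_nil,
      Nat.max_def]
    split <;> omega
  have h2 : ('<' :: (w ++ '>' :: s)).drop (w.length + 2) = s := by
    have he : ('<' :: (w ++ '>' :: s)) = ('<' :: w ++ ['>']) ++ s := by simp
    rw [he, List.drop_left' (by simp)]
  simp only [h1, h2]

theorem pvEf_piece_miss {pats : List (List Char × List Char)}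
    (G1 : ∀ q ∈ pats, ∃ n, q.1 = '<' :: n ++ ['>'] ∧ pvBF n)
    {w : List Char} (hw : pvBF w) (hno : ∀ q ∈ pats, q.1 ≠ '<' :: w ++ ['>']) (f : Nat) (s : List Char) :
    pvEf pats (f+1) ('<' :: (w ++ '>' :: s)) = '<' :: (w ++ '>' :: pvEf pats (f+1) s) := by
  rw [pvEf, pvFind_miss G1 hw hno]
  have hbody : pvEf pats (f+1) (w ++ '>' :: s) = w ++ '>' :: pvEf pats (f+1) s := by
    rw [pvEf_chrs G1 (fun c hc => (hw c hc).1)]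
    rw [pvEf_chr G1 (by decide)]
  rw [hbody]

theorem pvEf_NF {pats : List (List Char × List Char)} :
    ∀ (f : Nat) (s : List Char), (∀ q ∈ pats, ¬ q.1 <:+: s) → pvEf pats f s = s := by
  intro f
  cases f with
  | zero => intro s _; exact pvEf_zero pats s
  | succ f =>
    intro s
    induction s with
    | nil => intro _; exact pvEf_nil pats _
    | cons c t ih =>
      intro hno
      have hnone : pats.find? (fun q => q.1.isPrefixOf (c :: t)) = none := by
        rw [List.find?_eq_none]
        intro q hq
        simp only [Bool.not_eq_true, ← Bool.not_eq_true, List.isPrefixOf_iff_prefix]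
        intro hp
        exact hno q hq hp.isInfix
      rw [pvEf, hnone, ih (fun q hq hinf => hno q hq (List.infix_cons hinf))]

-- no pattern straddles an append boundary whose left part is well formed
theorem pvWf_append {x y : List Char} (hx : PvWf x) (hy : PvWf y) : PvWf (x ++ y) := by
  induction hx with
  | nil => simpa using hy
  | chr hc _ ih => exact PvWf.chr hc ih
  | @pie w s hw _ ih =>
    have heq : '<' :: (w ++ '>' :: s) ++ y = '<' :: (w ++ '>' :: (s ++ y)) := by simp
    rw [heq]
    exact PvWf.pie hw ih

theorem pvSkip {a r x : List Char} (ha : ∀ c ∈ a, c ≠ '<') :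
    ('<' :: x) <:+: (a ++ r) → ('<' :: x) <:+: r := by
  induction a with
  | nil => simp
  | cons c a' ih =>
    intro h
    rw [List.cons_append, List.infix_cons_iff] at h
    rcases h with h | h
    · exact absurd h (pvNoPrefix_head (ha c (by simp)))
    · exact ih (fun c hc => ha c (List.mem_cons_of_mem _ hc)) h

theorem pvOcc_append {pats : List (List Char × List Char)}
    (G1 : ∀ q ∈ pats, ∃ n, q.1 = '<' :: n ++ ['>'] ∧ pvBF n)
    {x : List Char} (hx : PvWf x) {y : List Char} {q : List Char × List Char} (hq : q ∈ pats) :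
    q.1 <:+: (x ++ y) → q.1 <:+: x ∨ q.1 <:+: y := by
  obtain ⟨n, hq1, hq2⟩ := G1 q hq
  induction hx with
  | nil => intro h; exact Or.inr (by simpa using h)
  | @chr c x' hc _ ih =>
    intro h
    rw [List.cons_append, List.infix_cons_iff] at h
    rcases h with h | h
    · rw [hq1, List.cons_append] at h
      exact absurd h (pvNoPrefix_head hc)
    · rcases ih h with h | h
      · exact Or.inl (List.infix_cons h)
      · exact Or.inr h
  | @pie w x' hw _ ih =>
    intro h
    have hassoc : '<' :: (w ++ '>' :: x') ++ y = '<' :: (w ++ '>' :: (x' ++ y)) := by simp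
    rw [hassoc, List.infix_cons_iff] at h
    rcases h with h | h
    · rw [hq1] at h
      have hn : n = w := (pvPatPrefix hq2 (fun c hc => hw c hc) _).mp h
      refine Or.inl ?_
      apply List.IsPrefix.isInfix
      rw [hq1, hn]
      exact (pvPatPrefix (hn ▸ hq2) hw x').mpr rfl
    · have hwgt : ∀ c ∈ w ++ ['>'], c ≠ '<' := by
        intro c hc
        rcases List.mem_append.mp hc with h3 | h3
        · exact (hw c h3).1
        · simp at h3; subst h3; decide
      have hh : '<' :: (n ++ ['>']) <:+: (w ++ ['>'] ++ (x' ++ y)) := by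
        have h4 := h
        rw [hq1, List.cons_append] at h4
        simpa using h4
      have h2 : q.1 <:+: (x' ++ y) := by
        rw [hq1, List.cons_append]
        exact pvSkip hwgt hh
      rcases ih h2 with h3 | h3
      · refine Or.inl (List.IsInfix.trans h3 ?_)
        refine List.IsSuffix.isInfix ?_
        exact ⟨['<'] ++ w ++ ['>'], by simp⟩
      · exact Or.inr h3

theorem pvNF_append {pats : List (List Char × List Char)}
    (G1 : ∀ q ∈ pats, ∃ n, q.1 = '<' :: n ++ ['>'] ∧ pvBF n)
    {x y : List Char} (hx : PvWf x) (hnx : ∀ q ∈ pats, ¬ q.1 <:+: x) (hny : ∀ q ∈ pats, ¬ q.1 <:+: y) :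
    ∀ q ∈ pats, ¬ q.1 <:+: (x ++ y) := by
  intro q hq hinf
  rcases pvOcc_append G1 hx hq hinf with h | h
  · exact hnx q hq h
  · exact hny q hq h

theorem pvEf_append {pats : List (List Char × List Char)}
    (G1 : ∀ q ∈ pats, ∃ n, q.1 = '<' :: n ++ ['>'] ∧ pvBF n)
    (G2 : (pats.map Prod.fst).Nodup)
    {x : List Char} (hx : PvWf x) (f : Nat) (y : List Char) :
    pvEf pats (f+1) (x ++ y) = pvEf pats (f+1) x ++ pvEf pats (f+1) y := by
  induction hx with
  | nil => simp [pvEf_nil]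
  | @chr c x' hc _ ih =>
    rw [List.cons_append, pvEf_chr G1 hc, pvEf_chr G1 hc, ih, List.cons_append]
  | @pie w x' hw hx' ih =>
    have hassoc : '<' :: (w ++ '>' :: x') ++ y = '<' :: (w ++ '>' :: (x' ++ y)) := by simp
    rw [hassoc]
    by_cases hq : ∃ v, ('<' :: w ++ ['>'], v) ∈ pats
    · obtain ⟨v, hv⟩ := hq
      rw [pvEf_piece_hit G1 G2 hw hv, pvEf_piece_hit G1 G2 hw hv, ih, List.append_assoc]
    · have hno : ∀ q ∈ pats, q.1 ≠ '<' :: w ++ ['>'] := by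
        intro q hq2 hcontra
        exact hq ⟨q.2, by rw [← hcontra]; exact hq2⟩
      rw [pvEf_piece_miss G1 hw hno, pvEf_piece_miss G1 hw hno, ih]
      simp

theorem pvEf_fuel {pats : List (List Char × List Char)} {rkp : List Char × List Char → Nat}
    (G1 : ∀ q ∈ pats, ∃ n, q.1 = '<' :: n ++ ['>'] ∧ pvBF n)
    (G2 : (pats.map Prod.fst).Nodup)
    (G3 : ∀ q ∈ pats, PvWf q.2)
    (G4 : ∀ q q', q ∈ pats → q' ∈ pats → q'.1 <:+: q.2 → rkp q' < rkp q) :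
    ∀ (f1 : Nat) (f2 : Nat) (s : List Char), PvWf s →
      (∀ q ∈ pats, q.1 <:+: s → rkp q < f1 ∧ rkp q < f2) →
      pvEf pats f1 s = pvEf pats f2 s := by
  intro f1
  induction f1 using Nat.strong_induction_on with
  | _ f1 ihf =>
  intro f2 s hs hbnd
  cases f1 with
  | zero =>
    have hnf : ∀ q ∈ pats, ¬ q.1 <:+: s := fun q hq hinf => absurd (hbnd q hq hinf).1 (by omega)
    rw [pvEf_NF 0 s hnf, pvEf_NF f2 s hnf]
  | succ f1 =>
    cases f2 with
    | zero =>
      have hnf : ∀ q ∈ pats, ¬ q.1 <:+: s := fun q hq hinf => absurd (hbnd q hq hinf).2 (by omega)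
      rw [pvEf_NF _ s hnf, pvEf_NF 0 s hnf]
    | succ f2 =>
      revert hbnd
      induction hs with
      | nil => intro _; rw [pvEf_nil, pvEf_nil]
      | @chr c t hc _ ih =>
        intro hbnd
        rw [pvEf_chr G1 hc, pvEf_chr G1 hc,
          ih (fun q hq hinf => hbnd q hq (List.infix_cons hinf))]
      | @pie w t hw hwf ih =>
        intro hbnd
        have hsuf : t <:+ ('<' :: (w ++ '>' :: t)) := ⟨'<' :: w ++ ['>'], by simp⟩
        have hbt : ∀ q ∈ pats, q.1 <:+: t → rkp q < f1 + 1 ∧ rkp q < f2 + 1 :=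
          fun q hq hinf => hbnd q hq (hinf.trans hsuf.isInfix)
        by_cases hex : ∃ v, ('<' :: w ++ ['>'], v) ∈ pats
        · obtain ⟨v, hv⟩ := hex
          rw [pvEf_piece_hit G1 G2 hw hv, pvEf_piece_hit G1 G2 hw hv]
          have hq0 : ('<' :: w ++ ['>'], v).1 <:+: ('<' :: (w ++ '>' :: t)) := by
            apply List.IsPrefix.isInfix
            simp only [List.cons_append]
            exact (pvPatPrefix hw hw t).mpr rfl
          have hrk0 := hbnd _ hv hq0
          have hv1 : pvEf pats f1 v = pvEf pats f2 v := by
            apply ihf f1 (Nat.lt_succ_self f1) f2 v (G3 _ hv)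
            intro q hq hinf
            have := G4 _ q hv hq hinf
            omega
          rw [hv1, ih hbt]
        · have hno : ∀ q ∈ pats, q.1 ≠ '<' :: w ++ ['>'] := by
            intro q hq2 hcontra
            exact hex ⟨q.2, by rw [← hcontra]; exact hq2⟩
          rw [pvEf_piece_miss G1 hw hno, pvEf_piece_miss G1 hw hno, ih hbt]

theorem pvEf_wf_nf {pats : List (List Char × List Char)} {rkp : List Char × List Char → Nat}
    (G1 : ∀ q ∈ pats, ∃ n, q.1 = '<' :: n ++ ['>'] ∧ pvBF n)
    (G2 : (pats.map Prod.fst).Nodup)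
    (G3 : ∀ q ∈ pats, PvWf q.2)
    (G4 : ∀ q q', q ∈ pats → q' ∈ pats → q'.1 <:+: q.2 → rkp q' < rkp q) :
    ∀ (f : Nat) (s : List Char), PvWf s →
      (∀ q ∈ pats, q.1 <:+: s → rkp q < f) →
      PvWf (pvEf pats f s) ∧ (∀ q ∈ pats, ¬ q.1 <:+: pvEf pats f s) := by
  intro f
  induction f using Nat.strong_induction_on with
  | _ f ihf =>
  intro s hs hbnd
  cases f with
  | zero =>
    have hnf : ∀ q ∈ pats, ¬ q.1 <:+: s := fun q hq hinf => absurd (hbnd q hq hinf) (by omega)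
    rw [pvEf_zero]
    exact ⟨hs, hnf⟩
  | succ f =>
    revert hbnd
    induction hs with
    | nil =>
      intro _
      rw [pvEf_nil]
      refine ⟨PvWf.nil, ?_⟩
      intro q hq hinf
      obtain ⟨n, hq1, _⟩ := G1 q hq
      have := List.eq_nil_of_infix_nil hinf
      rw [hq1] at this
      simp at this
    | @chr c t hc _ ih =>
      intro hbnd
      have hbt := fun q hq hinf => hbnd q hq (List.infix_cons hinf)
      obtain ⟨ihw, ihn⟩ := ih hbt
      rw [pvEf_chr G1 hc]
      refine ⟨PvWf.chr hc ihw, ?_⟩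
      intro q hq hinf
      rw [List.infix_cons_iff] at hinf
      rcases hinf with hinf | hinf
      · obtain ⟨n, hq1, _⟩ := G1 q hq
        rw [hq1, List.cons_append] at hinf
        exact pvNoPrefix_head hc hinf
      · exact ihn q hq hinf
    | @pie w t hw hwf ih =>
      intro hbnd
      have hsuf : t <:+ ('<' :: (w ++ '>' :: t)) := ⟨'<' :: w ++ ['>'], by simp⟩
      have hbt : ∀ q ∈ pats, q.1 <:+: t → rkp q < f + 1 :=
        fun q hq hinf => hbnd q hq (hinf.trans hsuf.isInfix)
      obtain ⟨ihw, ihn⟩ := ih hbt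
      by_cases hex : ∃ v, ('<' :: w ++ ['>'], v) ∈ pats
      · obtain ⟨v, hv⟩ := hex
        rw [pvEf_piece_hit G1 G2 hw hv]
        have hq0 : ('<' :: w ++ ['>'], v).1 <:+: ('<' :: (w ++ '>' :: t)) := by
          apply List.IsPrefix.isInfix
          simp only [List.cons_append]
          exact (pvPatPrefix hw hw t).mpr rfl
        have hrk0 := hbnd _ hv hq0
        have hvpart := ihf f (Nat.lt_succ_self f) v (G3 _ hv) (by
          intro q hq hinf
          have := G4 _ q hv hq hinf
          omega)
        exact ⟨pvWf_append hvpart.1 ihw, pvNF_append G1 hvpart.1 hvpart.2 ihn⟩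
      · have hno : ∀ q ∈ pats, q.1 ≠ '<' :: w ++ ['>'] := by
          intro q hq2 hcontra
          exact hex ⟨q.2, by rw [← hcontra]; exact hq2⟩
        rw [pvEf_piece_miss G1 hw hno]
        refine ⟨PvWf.pie hw ihw, ?_⟩
        intro q hq hinf
        rw [List.infix_cons_iff] at hinf
        rcases hinf with hinf | hinf
        · obtain ⟨n, hq1, hq2⟩ := G1 q hq
          rw [hq1, List.cons_append] at hinf
          have := (pvPatPrefix hq2 hw _).mp hinf
          exact hno q hq (by rw [hq1, this])
        · have hwgt : ∀ c ∈ w ++ ['>'], c ≠ '<' := by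
            intro c hc
            rcases List.mem_append.mp hc with h3 | h3
            · exact (hw c h3).1
            · simp at h3; subst h3; decide
          obtain ⟨n, hq1, hq2⟩ := G1 q hq
          apply ihn q hq
          rw [hq1, List.cons_append]
          apply pvSkip hwgt
          have h4 := hinf
          rw [hq1, List.cons_append] at h4
          simpa using h4

-- pvRepl structure lemmas
theorem pvRepl_chr {n W t : List Char} {c : Char} (hc : c ≠ '<') :
    pvRepl ('<' :: n ++ ['>']) W (c :: t) = c :: pvRepl ('<' :: n ++ ['>']) W t := by
  rw [pvRepl_cons, if_neg]
  rw [List.isPrefixOf_iff_prefix, List.cons_append]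
  exact pvNoPrefix_head hc

theorem pvRepl_skip {n W a r : List Char} (ha : ∀ c ∈ a, c ≠ '<') :
    pvRepl ('<' :: n ++ ['>']) W (a ++ r) = a ++ pvRepl ('<' :: n ++ ['>']) W r := by
  induction a with
  | nil => simp
  | cons c a' ih =>
    show pvRepl ('<' :: n ++ ['>']) W (c :: (a' ++ r)) = c :: (a' ++ pvRepl ('<' :: n ++ ['>']) W r)
    rw [pvRepl_chr (ha c (by simp)), ih (fun c hc => ha c (List.mem_cons_of_mem _ hc))]

theorem pvDrop_piece (n s : List Char) :
    List.drop (('<' :: n ++ ['>']).length - 1) (n ++ '>' :: s) = s := by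
  have h1 : ('<' :: n ++ ['>']).length - 1 = n.length + 1 := by simp
  have h2 : n ++ '>' :: s = (n ++ ['>']) ++ s := by simp
  rw [h1, h2, List.drop_left' (by simp)]

theorem pvRepl_piece_hit {n W t : List Char} (hn : pvBF n) :
    pvRepl ('<' :: n ++ ['>']) W ('<' :: (n ++ '>' :: t)) = W ++ pvRepl ('<' :: n ++ ['>']) W t := by
  rw [pvRepl_cons, if_pos, pvDrop_piece]
  rw [List.isPrefixOf_iff_prefix, List.cons_append]
  exact (pvPatPrefix hn hn t).mpr rfl

theorem pvRepl_piece_miss {n w W t : List Char} (hn : pvBF n) (hw : pvBF w) (hne : n ≠ w) :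
    pvRepl ('<' :: n ++ ['>']) W ('<' :: (w ++ '>' :: t)) = '<' :: (w ++ '>' :: pvRepl ('<' :: n ++ ['>']) W t) := by
  rw [pvRepl_cons, if_neg]
  · have h2 : w ++ '>' :: t = (w ++ ['>']) ++ t := by simp
    rw [h2, pvRepl_skip (by
      intro c hc
      rcases List.mem_append.mp hc with h3 | h3
      · exact (hw c h3).1
      · simp at h3; subst h3; decide)]
    simp
  · rw [List.isPrefixOf_iff_prefix, List.cons_append]
    intro hp
    exact hne ((pvPatPrefix hn hw t).mp hp)

theorem pvRepl_wf {n W : List Char} (hn : pvBF n) (hW : PvWf W) :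
    ∀ {s : List Char}, PvWf s → PvWf (pvRepl ('<' :: n ++ ['>']) W s) := by
  intro s hs
  induction hs with
  | nil => rw [pvRepl]; exact PvWf.nil
  | @chr c t hc _ ih => rw [pvRepl_chr hc]; exact PvWf.chr hc ih
  | @pie w t hw _ ih =>
    by_cases hne : n = w
    · subst hne
      rw [pvRepl_piece_hit hn]
      exact pvWf_append hW ih
    · rw [pvRepl_piece_miss hn hw hne]
      exact PvWf.pie hw ih

-- the central invariance: replacing a pattern by W (with the same expansion as its value)
-- does not change the normal form
theorem pvRepl_Ef {pats : List (List Char × List Char)}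
    (G1 : ∀ q ∈ pats, ∃ n, q.1 = '<' :: n ++ ['>'] ∧ pvBF n)
    (G2 : (pats.map Prod.fst).Nodup)
    {n v : List Char} (hmem : ('<' :: n ++ ['>'], v) ∈ pats) (hn : pvBF n)
    {W : List Char} (hW : PvWf W) {f : Nat}
    (hWe : pvEf pats (f+1) W = pvEf pats f v) :
    ∀ {s : List Char}, PvWf s →
      pvEf pats (f+1) (pvRepl ('<' :: n ++ ['>']) W s) = pvEf pats (f+1) s := by
  intro s hs
  induction hs with
  | nil => rw [pvRepl]
  | @chr c t hc _ ih =>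
    rw [pvRepl_chr hc, pvEf_chr G1 hc, pvEf_chr G1 hc, ih]
  | @pie w t hw _ ih =>
    by_cases hne : n = w
    · subst hne
      rw [pvRepl_piece_hit hn, pvEf_append G1 G2 hW, pvEf_piece_hit G1 G2 hn hmem, hWe, ih]
    · by_cases hex : ∃ v, ('<' :: w ++ ['>'], v) ∈ pats
      · obtain ⟨v2, hv2⟩ := hex
        rw [pvRepl_piece_miss hn hw hne, pvEf_piece_hit G1 G2 hw hv2,
          pvEf_piece_hit G1 G2 hw hv2, ih]
      · have hno : ∀ q ∈ pats, q.1 ≠ '<' :: w ++ ['>'] := by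
          intro q hq2 hcontra
          exact hex ⟨q.2, by rw [← hcontra]; exact hq2⟩
        rw [pvRepl_piece_miss hn hw hne, pvEf_piece_miss G1 hw hno,
          pvEf_piece_miss G1 hw hno, ih]

theorem pvRepl_occ {pats : List (List Char × List Char)}
    (G1 : ∀ q ∈ pats, ∃ n, q.1 = '<' :: n ++ ['>'] ∧ pvBF n)
    {n W : List Char} (hn : pvBF n) (hW : PvWf W) :
    ∀ {s : List Char}, PvWf s → ∀ q ∈ pats, q.1 <:+: pvRepl ('<' :: n ++ ['>']) W s →
      (q.1 ≠ '<' :: n ++ ['>'] ∧ q.1 <:+: s) ∨ q.1 <:+: W := by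
  intro s hs
  induction hs with
  | nil =>
    intro q hq hinf
    rw [pvRepl] at hinf
    obtain ⟨m, hq1, _⟩ := G1 q hq
    have := List.eq_nil_of_infix_nil hinf
    rw [hq1] at this
    simp at this
  | @chr c t hc _ ih =>
    intro q hq hinf
    rw [pvRepl_chr hc, List.infix_cons_iff] at hinf
    rcases hinf with hinf | hinf
    · obtain ⟨m, hq1, _⟩ := G1 q hq
      rw [hq1, List.cons_append] at hinf
      exact absurd hinf (pvNoPrefix_head hc)
    · rcases ih q hq hinf with ⟨h1, h2⟩ | h1
      · exact Or.inl ⟨h1, List.infix_cons h2⟩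
      · exact Or.inr h1
  | @pie w t hw _ ih =>
    intro q hq hinf
    have hsuf : t <:+ ('<' :: (w ++ '>' :: t)) := ⟨'<' :: w ++ ['>'], by simp⟩
    by_cases hne : n = w
    · subst hne
      rw [pvRepl_piece_hit hn] at hinf
      rcases pvOcc_append G1 hW hq hinf with h1 | h1
      · exact Or.inr h1
      · rcases ih q hq h1 with ⟨h2, h3⟩ | h2
        · exact Or.inl ⟨h2, h3.trans hsuf.isInfix⟩
        · exact Or.inr h2
    · rw [pvRepl_piece_miss hn hw hne, List.infix_cons_iff] at hinf
      rcases hinf with hinf | hinf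
      · obtain ⟨m, hq1, hq2⟩ := G1 q hq
        rw [hq1, List.cons_append] at hinf
        have hm : m = w := (pvPatPrefix hq2 hw _).mp hinf
        refine Or.inl ⟨?_, ?_⟩
        · rw [hq1, hm]
          intro hcontra
          apply hne
          have h5 : n ++ ['>'] = w ++ ['>'] := by simpa using hcontra.symm
          simpa using h5
        · apply List.IsPrefix.isInfix
          rw [hq1, hm, List.cons_append]
          exact (pvPatPrefix (hm ▸ hq2) hw t).mpr rfl
      · obtain ⟨m, hq1, hq2⟩ := G1 q hq
        have hwgt : ∀ c ∈ w ++ ['>'], c ≠ '<' := by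
          intro c hc
          rcases List.mem_append.mp hc with h3 | h3
          · exact (hw c h3).1
          · simp at h3; subst h3; decide
        have h4 : q.1 <:+: pvRepl ('<' :: n ++ ['>']) W t := by
          rw [hq1, List.cons_append]
          apply pvSkip hwgt
          have h5 := hinf
          rw [hq1, List.cons_append] at h5
          simpa using h5
        rcases ih q hq h4 with ⟨h5, h6⟩ | h5
        · exact Or.inl ⟨h5, h6.trans hsuf.isInfix⟩
        · exact Or.inr h5

-- ranks
def pvRStep (l : List (String × String)) (f : Nat) : String → Option Nat → Option Nat :=
  fun u acc => match pvRankB l f u, acc with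
    | some r, some m => some (max (r+1) m)
    | _, _ => none

theorem pvRankB_succ (l : List (String × String)) (f : Nat) (t : String) :
    pvRankB l (f+1) t = (pvDeps l t).foldr (pvRStep l f) (some 0) := rfl

theorem pvRankFold_extract {l : List (String × String)} {f : Nat} {ds : List String} {m : Nat}
    (h : ds.foldr (pvRStep l f) (some 0) = some m) :
    ∀ u ∈ ds, ∃ r, pvRankB l f u = some r ∧ r < m := by
  induction ds generalizing m with
  | nil => intro u hu; simp at hu
  | cons u0 ds ih =>
    intro u hu
    rw [List.foldr_cons] at h
    simp only [pvRStep] at h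
    cases h1 : pvRankB l f u0 <;> rw [h1] at h
    · simp at h
    · cases h2 : ds.foldr (pvRStep l f) (some 0) <;> rw [h2] at h
      · simp at h
      · rename_i r0 m0
        simp only [Option.some.injEq] at h
        rcases List.mem_cons.mp hu with rfl | hu'
        · refine ⟨r0, h1, ?_⟩
          have := Nat.le_max_left (r0+1) m0
          omega
        · obtain ⟨r', hr1, hr2⟩ := ih h2 u hu'
          refine ⟨r', hr1, ?_⟩
          have := Nat.le_max_right (r0+1) m0
          omega

theorem pvRankAux_mono {l : List (String × String)} {f : Nat}
    (hmono : ∀ t r, pvRankB l f t = some r → pvRankB l (f+1) t = some r) :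
    ∀ (ds : List String) (m : Nat), ds.foldr (pvRStep l f) (some 0) = some m →
      ds.foldr (pvRStep l (f+1)) (some 0) = some m := by
  intro ds
  induction ds with
  | nil => intro m h; simpa using h
  | cons u0 ds ih =>
    intro m h
    rw [List.foldr_cons] at h ⊢
    simp only [pvRStep] at h ⊢
    cases h1 : pvRankB l f u0 <;> rw [h1] at h
    · simp at h
    · cases h2 : ds.foldr (pvRStep l f) (some 0) <;> rw [h2] at h
      · simp at h
      · rw [hmono u0 _ h1, ih _ h2]
        exact h

theorem pvRank_mono {l : List (String × String)} :
    ∀ (f : Nat) (t : String) (r : Nat), pvRankB l f t = some r → pvRankB l (f+1) t = some r := by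
  intro f
  induction f with
  | zero => intro t r h; rw [pvRankB] at h; exact absurd h (by simp)
  | succ f ih =>
    intro t r h
    rw [pvRankB_succ] at h
    rw [pvRankB_succ]
    exact pvRankAux_mono (fun t r h => ih t r h) _ _ h

theorem pvRank_lt_fuel {l : List (String × String)} :
    ∀ (f : Nat) (t : String) (r : Nat), pvRankB l f t = some r → r < f := by
  intro f
  induction f with
  | zero => intro t r h; rw [pvRankB] at h; exact absurd h (by simp)
  | succ f ih =>
    intro t r h
    rw [pvRankB_succ] at h
    suffices haux : ∀ (ds : List String) (m : Nat), ds.foldr (pvRStep l f) (some 0) = some m → m ≤ f by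
      have := haux _ _ h
      omega
    intro ds
    induction ds with
    | nil => intro m hm; simp at hm; omega
    | cons u0 ds ihds =>
      intro m hm
      rw [List.foldr_cons] at hm
      simp only [pvRStep] at hm
      cases h1 : pvRankB l f u0 <;> rw [h1] at hm
      · simp at hm
      · cases h2 : ds.foldr (pvRStep l f) (some 0) <;> rw [h2] at hm
        · simp at hm
        · rename_i r0 m0
          simp only [Option.some.injEq] at hm
          have hr0 := ih u0 r0 h1
          have hm0 := ihds _ h2
          have h3 : max (r0+1) m0 ≤ f := Nat.max_le.mpr ⟨by omega, hm0⟩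
          rw [← hm]
          exact h3

-- the rank of a tag, and of a pattern
def pvRkn (l : List (String × String)) (t : String) : Nat :=
  (pvRankB l (l.length + 1) t).getD 0

def pvRkp (l : List (String × String)) (q : List Char × List Char) : Nat :=
  pvRkn l (String.ofList q.1.tail.dropLast)

-- the pattern list of the instance
def pvPatsL (l : List (String × String)) : List (List Char × List Char) :=
  (pvKeys l).map (fun k => (pvPatC k, (pvLookup l k).toList))

theorem pvLookup_find {l : List (String × String)} {t : String}
    (h : t ∈ l.map Prod.fst) : (t, pvLookup l t) ∈ l := by
  induction l with
  | nil => simp at h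
  | cons p rest ih =>
    obtain ⟨a, b⟩ := p
    by_cases hp : a = t
    · subst hp
      have hfind : ((a, b) :: rest).find? (fun q => q.1 == a) = some (a, b) :=
        List.find?_cons_of_pos (by simp)
      simp [pvLookup, hfind]
    · have hb : ¬ ((fun (q : String × String) => q.1 == t) (a, b) = true) := by simp [hp]
      have ht : t ∈ rest.map Prod.fst := by
        rcases List.mem_map.mp h with ⟨q, hq, hq2⟩
        rcases List.mem_cons.mp hq with h1 | h1
        · exfalso; apply hp; subst h1; simpa using hq2
        · exact List.mem_map.mpr ⟨q, h1, hq2⟩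
      have hrec := ih ht
      have hlk : pvLookup ((a, b) :: rest) t = pvLookup rest t := by
        unfold pvLookup
        rw [List.find?_cons_of_neg (p := fun q => q.1 == t) (a := (a, b)) (l := rest) hb]
      rw [hlk]
      exact List.mem_cons_of_mem _ hrec

-- ===== instance facts from Pre_'s second branch =====
-- abbreviated hypothesis: the second branch of Pre_
def pvH (prompt : String) (l : List (String × String)) : Prop :=
  (l.map Prod.fst).Nodup
  ∧ (∀ p ∈ l, '<' ∉ p.1.toList ∧ '>' ∉ p.1.toList
       ∧ pvWfB p.2.toList = true
       ∧ (pvRankB l (l.length + 1) p.1).isSome = true)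
  ∧ pvWfB prompt.toList = true

theorem pvH_keys {prompt : String} {l : List (String × String)} (h : pvH prompt l) :
    pvKeys l = l.map Prod.fst := by
  unfold pvKeys
  rw [PySem.List.dedup_eq_ofList]
  exact PySem.Set.ofList_eq_self_of_nodup _ h.1

theorem pvH_entry {prompt : String} {l : List (String × String)} (h : pvH prompt l) {k : String}
    (hk : k ∈ pvKeys l) : (k, pvLookup l k) ∈ l := by
  apply pvLookup_find
  rw [← pvH_keys h]
  exact hk

theorem pvBF_name {prompt : String} {l : List (String × String)} (h : pvH prompt l) {k : String}
    (hk : k ∈ pvKeys l) : pvBF k.toList := by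
  obtain ⟨h1, h2, _⟩ := (h.2.1 _ (pvH_entry h hk) : _)
  intro c hc
  exact ⟨fun hcc => h1 (hcc ▸ hc), fun hcc => h2 (hcc ▸ hc)⟩

theorem pvH_G1 {prompt : String} {l : List (String × String)} (h : pvH prompt l) :
    ∀ q ∈ pvPatsL l, ∃ n, q.1 = '<' :: n ++ ['>'] ∧ pvBF n := by
  intro q hq
  obtain ⟨k, hk, rfl⟩ := List.mem_map.mp hq
  exact ⟨k.toList, rfl, pvBF_name h hk⟩

theorem pvH_G2 {prompt : String} {l : List (String × String)} (h : pvH prompt l) :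
    ((pvPatsL l).map Prod.fst).Nodup := by
  have hkeys : (pvKeys l).Nodup := by
    rw [pvH_keys h]
    exact h.1
  have hmap : (pvPatsL l).map Prod.fst = (pvKeys l).map pvPatC := by
    simp [pvPatsL, Function.comp]
  rw [hmap]
  refine List.Nodup.map ?_ hkeys
  intro a b hab
  unfold pvPatC at hab
  have : a.toList = b.toList := by simpa using hab
  exact String.toList_inj.mp this

theorem pvH_G3 {prompt : String} {l : List (String × String)} (h : pvH prompt l) :
    ∀ q ∈ pvPatsL l, PvWf q.2 := by
  intro q hq
  obtain ⟨k, hk, rfl⟩ := List.mem_map.mp hq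
  exact pvWfB_wf (h.2.1 _ (pvH_entry h hk)).2.2.1

theorem pvRkp_pat {l : List (String × String)} (k : String) (v : List Char) :
    pvRkp l (pvPatC k, v) = pvRkn l k := by
  unfold pvRkp pvPatC
  have h1 : ('<' :: k.toList ++ ['>'] : List Char).tail = k.toList ++ ['>'] := by simp
  have h2 : (k.toList ++ ['>'] : List Char).dropLast = k.toList := by
    rw [List.dropLast_concat]
  simp only [h1, h2]
  congr 1
  exact String.toList_inj.mp (by simp)

theorem pvH_G4 {prompt : String} {l : List (String × String)} (h : pvH prompt l) :
    ∀ q q', q ∈ pvPatsL l → q' ∈ pvPatsL l → q'.1 <:+: q.2 → pvRkp l q' < pvRkp l q := by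
  intro q q' hq hq' hinf
  obtain ⟨k, hk, rfl⟩ := List.mem_map.mp hq
  obtain ⟨u, hu, rfl⟩ := List.mem_map.mp hq'
  rw [pvRkp_pat, pvRkp_pat]
  have hdep : u ∈ pvDeps l k := by
    rw [pvDeps, List.mem_filter]
    refine ⟨hu, ?_⟩
    rw [PySem.Str.isIn_iff_infix, pvPatS_toList]
    exact hinf
  obtain ⟨r, hr⟩ := Option.isSome_iff_exists.mp (h.2.1 _ (pvH_entry h hk)).2.2.2
  have hfold : (pvDeps l k).foldr (pvRStep l l.length) (some 0) = some r := by
    rw [← pvRankB_succ]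
    exact hr
  obtain ⟨ru, hru, hlt⟩ := pvRankFold_extract hfold u hdep
  have hru' : pvRankB l (l.length + 1) u = some ru := pvRank_mono _ _ _ hru
  unfold pvRkn
  rw [hr, hru']
  simpa using hlt

theorem pvH_G5 {prompt : String} {l : List (String × String)} (h : pvH prompt l) :
    ∀ q ∈ pvPatsL l, pvRkp l q < l.length + 1 := by
  intro q hq
  obtain ⟨k, hk, rfl⟩ := List.mem_map.mp hq
  rw [pvRkp_pat]
  obtain ⟨r, hr⟩ := Option.isSome_iff_exists.mp (h.2.1 _ (pvH_entry h hk)).2.2.2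
  unfold pvRkn
  rw [hr]
  simpa using pvRank_lt_fuel _ _ _ hr

-- present-tags characterisation
theorem pvMem_present {names : List String} {s : String} {t : String} :
    t ∈ pvPresentTags names s ↔ t ∈ names ∧ pvPatC t <:+: s.toList := by
  unfold pvPresentTags
  rw [PySem.Set.mem_ofList, List.mem_filter]
  constructor
  · rintro ⟨h1, h2⟩
    refine ⟨h1, ?_⟩
    have := (PySem.Str.isIn_iff_infix (pvPatS t) s).mp h2
    rwa [pvPatS_toList] at this
  · rintro ⟨h1, h2⟩
    refine ⟨h1, ?_⟩
    rw [PySem.Str.isIn_iff_infix, pvPatS_toList]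
    exact h2

-- occurrences of instance patterns vs keys
theorem pvPats_mem {prompt : String} {l : List (String × String)} (h : pvH prompt l) {k : String}
    (hk : k ∈ pvKeys l) : (pvPatC k, (pvLookup l k).toList) ∈ pvPatsL l := by
  exact List.mem_map.mpr ⟨k, hk, rfl⟩

theorem pvPatC_def (t : String) : pvPatC t = '<' :: t.toList ++ ['>'] := rfl

-- wf and value facts packaged
theorem pvH_val_wf {prompt : String} {l : List (String × String)} (h : pvH prompt l) {k : String}
    (hk : k ∈ pvKeys l) : PvWf (pvLookup l k).toList :=
  pvWfB_wf (h.2.1 _ (pvH_entry h hk)).2.2.1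

-- ===== A-side =====
theorem pvRound_Ef {prompt : String} {l : List (String × String)} (h : pvH prompt l) :
    ∀ (ts : List String) (s : String), (∀ t ∈ ts, t ∈ pvKeys l) → PvWf s.toList →
      pvEf (pvPatsL l) (l.length + 1)
          ((ts.foldl (fun s t => PySem.Str.replace s (pvPatS t) (pvLookup l t)) s).toList)
        = pvEf (pvPatsL l) (l.length + 1) s.toList := by
  intro ts
  induction ts with
  | nil => intro s _ _; rfl
  | cons t0 ts' ih =>
    intro s hts hwf
    have hk0 : t0 ∈ pvKeys l := hts t0 (List.mem_cons_self ..)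
    have hmem := pvPats_mem h hk0
    have hn0 := pvBF_name h hk0
    have hv0 := pvH_val_wf h hk0
    have hwf1 : PvWf (PySem.Str.replace s (pvPatS t0) (pvLookup l t0)).toList := by
      rw [pvReplace_toList, pvPatC_def]
      exact pvRepl_wf hn0 hv0 hwf
    rw [List.foldl_cons, ih _ (fun t ht => hts t (List.mem_cons_of_mem _ ht)) hwf1]
    rw [pvReplace_toList, pvPatC_def]
    have hWe : pvEf (pvPatsL l) (l.length + 1) (pvLookup l t0).toList
        = pvEf (pvPatsL l) l.length (pvLookup l t0).toList := by
      apply pvEf_fuel (pvH_G1 h) (pvH_G2 h) (pvH_G3 h) (pvH_G4 h) _ _ _ hv0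
      intro q hq hinf
      have h1 := pvH_G4 h _ q hmem hq hinf
      have h2 := pvH_G5 h _ hmem
      omega
    exact pvRepl_Ef (pvH_G1 h) (pvH_G2 h) (by rw [← pvPatC_def]; exact hmem) hn0 hv0 hWe hwf

theorem pvRound_wf {prompt : String} {l : List (String × String)} (h : pvH prompt l) :
    ∀ (ts : List String) (s : String), (∀ t ∈ ts, t ∈ pvKeys l) → PvWf s.toList →
      PvWf ((ts.foldl (fun s t => PySem.Str.replace s (pvPatS t) (pvLookup l t)) s).toList) := by
  intro ts
  induction ts with
  | nil => intro s _ hwf; exact hwf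
  | cons t0 ts' ih =>
    intro s hts hwf
    have hk0 : t0 ∈ pvKeys l := hts t0 (List.mem_cons_self ..)
    rw [List.foldl_cons]
    refine ih _ (fun t ht => hts t (List.mem_cons_of_mem _ ht)) ?_
    rw [pvReplace_toList, pvPatC_def]
    exact pvRepl_wf (pvBF_name h hk0) (pvH_val_wf h hk0) hwf

theorem pvRound_occ {prompt : String} {l : List (String × String)} (h : pvH prompt l) :
    ∀ (ts : List String) (s : String), (∀ t ∈ ts, t ∈ pvKeys l) → PvWf s.toList →
      ∀ q ∈ pvPatsL l,
        q.1 <:+: ((ts.foldl (fun s t => PySem.Str.replace s (pvPatS t) (pvLookup l t)) s).toList) →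
        (q.1 <:+: s.toList ∧ ∀ t ∈ ts, q.1 ≠ pvPatC t) ∨ ∃ t ∈ ts, q.1 <:+: (pvLookup l t).toList := by
  intro ts
  induction ts with
  | nil =>
    intro s _ _ q hq hinf
    exact Or.inl ⟨hinf, by simp⟩
  | cons t0 ts' ih =>
    intro s hts hwf q hq hinf
    have hk0 : t0 ∈ pvKeys l := hts t0 (List.mem_cons_self ..)
    have hn0 := pvBF_name h hk0
    have hv0 := pvH_val_wf h hk0
    have hwf1 : PvWf (PySem.Str.replace s (pvPatS t0) (pvLookup l t0)).toList := by
      rw [pvReplace_toList, pvPatC_def]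
      exact pvRepl_wf hn0 hv0 hwf
    rw [List.foldl_cons] at hinf
    rcases ih _ (fun t ht => hts t (List.mem_cons_of_mem _ ht)) hwf1 q hq hinf with ⟨h1, h2⟩ | ⟨t, ht, h1⟩
    · rw [pvReplace_toList, pvPatC_def] at h1
      rcases pvRepl_occ (pvH_G1 h) hn0 hv0 hwf q hq h1 with ⟨h3, h4⟩ | h3
      · refine Or.inl ⟨h4, ?_⟩
        intro t ht
        rcases List.mem_cons.mp ht with rfl | ht'
        · rw [pvPatC_def]; exact h3
        · exact h2 t ht'
      · exact Or.inr ⟨t0, List.mem_cons_self .., h3⟩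
    · exact Or.inr ⟨t, List.mem_cons_of_mem _ ht, h1⟩

theorem pvLoopA_Ef {prompt : String} {l : List (String × String)} (h : pvH prompt l) :
    ∀ (f : Nat) (s : String), PvWf s.toList →
      (∀ q ∈ pvPatsL l, q.1 <:+: s.toList → pvRkp l q < f) →
      pvLoopA l (pvKeys l) f s = String.ofList (pvEf (pvPatsL l) (l.length + 1) s.toList) := by
  intro f
  induction f with
  | zero =>
    intro s hwf hbnd
    have hnf : ∀ q ∈ pvPatsL l, ¬ q.1 <:+: s.toList :=
      fun q hq hinf => absurd (hbnd q hq hinf) (by omega)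
    rw [pvLoopA, pvEf_NF _ _ hnf]
    simp
  | succ f ih =>
    intro s hwf hbnd
    rw [pvLoopA]
    by_cases hemp : (pvPresentTags (pvKeys l) s).isEmpty
    · simp only [hemp, if_true]
      have hnf : ∀ q ∈ pvPatsL l, ¬ q.1 <:+: s.toList := by
        intro q hq hinf
        obtain ⟨k, hk, rfl⟩ := List.mem_map.mp hq
        have : k ∈ pvPresentTags (pvKeys l) s := pvMem_present.mpr ⟨hk, hinf⟩
        rw [List.isEmpty_iff.mp hemp] at this
        simp at this
      rw [pvEf_NF _ _ hnf]
      simp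
    · simp only [hemp, if_false]
      have hts : ∀ t ∈ pvPresentTags (pvKeys l) s, t ∈ pvKeys l :=
        fun t ht => (pvMem_present.mp ht).1
      have hwf1 := pvRound_wf h (pvPresentTags (pvKeys l) s) s hts hwf
      have hbnd1 : ∀ q ∈ pvPatsL l,
          q.1 <:+: ((pvPresentTags (pvKeys l) s).foldl
            (fun s t => PySem.Str.replace s (pvPatS t) (pvLookup l t)) s).toList →
          pvRkp l q < f := by
        intro q hq hinf
        rcases pvRound_occ h _ s hts hwf q hq hinf with ⟨h1, h2⟩ | ⟨t, ht, h1⟩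
        · exfalso
          obtain ⟨k, hk, rfl⟩ := List.mem_map.mp hq
          exact h2 k (pvMem_present.mpr ⟨hk, h1⟩) rfl
        · have hkt : t ∈ pvKeys l := hts t ht
          have hmemt := pvPats_mem h hkt
          have hlt := pvH_G4 h _ q hmemt hq h1
          have hbt : pvRkp l (pvPatC t, (pvLookup l t).toList) < f + 1 :=
            hbnd _ hmemt ((pvMem_present.mp ht).2)
          omega
      rw [ih _ hwf1 hbnd1, pvRound_Ef h _ s hts hwf]
      simp

-- ===== B-side =====
theorem pvFold_Ef {prompt : String} {l : List (String × String)} (h : pvH prompt l)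
    (F : String → String) (f : Nat)
    (hF : ∀ u ∈ pvKeys l, pvRkn l u < f →
        F u = String.ofList (pvEf (pvPatsL l) (l.length + 1) (pvLookup l u).toList)) :
    ∀ (rs : List String) (s : String), rs.Nodup → (∀ u ∈ rs, u ∈ pvKeys l) → PvWf s.toList →
      (∀ q ∈ pvPatsL l, q.1 <:+: s.toList → (∃ u ∈ rs, q.1 = pvPatC u) ∧ pvRkp l q < f) →
      rs.foldl (fun s t => if PySem.Str.isIn (pvPatS t) s then PySem.Str.replace s (pvPatS t) (F t) else s) s
        = String.ofList (pvEf (pvPatsL l) (l.length + 1) s.toList) := by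
  intro rs
  induction rs with
  | nil =>
    intro s _ _ hwf hocc
    have hnf : ∀ q ∈ pvPatsL l, ¬ q.1 <:+: s.toList := by
      intro q hq hinf
      obtain ⟨⟨u, hu, _⟩, _⟩ := hocc q hq hinf
      simp at hu
    rw [List.foldl_nil, pvEf_NF _ _ hnf]
    simp
  | cons t0 rs' ih =>
    intro s hnd hsub hwf hocc
    have hk0 : t0 ∈ pvKeys l := hsub t0 (List.mem_cons_self ..)
    have hn0 := pvBF_name h hk0
    have hv0 := pvH_val_wf h hk0
    have hmem := pvPats_mem h hk0
    rw [List.foldl_cons]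
    by_cases hin : PySem.Str.isIn (pvPatS t0) s
    · simp only [hin, if_true]
      -- t0's pattern occurs, so its rank is below f and F t0 is its full expansion
      have hocc0 : pvPatC t0 <:+: s.toList := by
        have := (PySem.Str.isIn_iff_infix _ _).mp hin
        rwa [pvPatS_toList] at this
      have hrk0 : pvRkp l (pvPatC t0, (pvLookup l t0).toList) < f := (hocc _ hmem hocc0).2
      have hF0 : F t0 = String.ofList (pvEf (pvPatsL l) (l.length + 1) (pvLookup l t0).toList) := by
        apply hF t0 hk0
        rw [pvRkp_pat] at hrk0
        exact hrk0
      have hWnf := pvEf_wf_nf (pvH_G1 h) (pvH_G2 h) (pvH_G3 h) (pvH_G4 h)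
        (l.length + 1) (pvLookup l t0).toList hv0
        (fun q hq hinf => pvH_G5 h q hq)
      have hWlist : (F t0).toList = pvEf (pvPatsL l) (l.length + 1) (pvLookup l t0).toList := by
        rw [hF0]; simp
      have hWe : pvEf (pvPatsL l) (l.length + 1) (F t0).toList
          = pvEf (pvPatsL l) l.length (pvLookup l t0).toList := by
        rw [hWlist, pvEf_NF _ _ hWnf.2]
        apply pvEf_fuel (pvH_G1 h) (pvH_G2 h) (pvH_G3 h) (pvH_G4 h) _ _ _ hv0
        intro q hq hinf
        have h1 := pvH_G4 h _ q hmem hq hinf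
        have h2 := pvH_G5 h _ hmem
        omega
      have hWwf : PvWf (F t0).toList := by rw [hWlist]; exact hWnf.1
      have hwf1 : PvWf (PySem.Str.replace s (pvPatS t0) (F t0)).toList := by
        rw [pvReplace_toList, pvPatC_def]
        exact pvRepl_wf hn0 hWwf hwf
      have hocc1 : ∀ q ∈ pvPatsL l,
          q.1 <:+: (PySem.Str.replace s (pvPatS t0) (F t0)).toList →
          (∃ u ∈ rs', q.1 = pvPatC u) ∧ pvRkp l q < f := by
        intro q hq hinf
        rw [pvReplace_toList, pvPatC_def] at hinf
        rcases pvRepl_occ (pvH_G1 h) hn0 hWwf hwf q hq hinf with ⟨h1, h2⟩ | h1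
        · obtain ⟨⟨u, hu, hqu⟩, hrk⟩ := hocc q hq h2
          rcases List.mem_cons.mp hu with rfl | hu'
          · exact absurd (by rw [hqu, pvPatC_def]) h1
          · exact ⟨⟨u, hu', hqu⟩, hrk⟩
        · exfalso
          rw [hWlist] at h1
          exact hWnf.2 q hq h1
      rw [ih _ hnd.of_cons (fun u hu => hsub u (List.mem_cons_of_mem _ hu)) hwf1 hocc1]
      have hstep : pvEf (pvPatsL l) (l.length + 1)
          (PySem.Str.replace s (pvPatS t0) (F t0)).toList
          = pvEf (pvPatsL l) (l.length + 1) s.toList := by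
        rw [pvReplace_toList, pvPatC_def]
        exact pvRepl_Ef (pvH_G1 h) (pvH_G2 h) (by rw [← pvPatC_def]; exact hmem) hn0 hWwf hWe hwf
      rw [hstep]
    · simp only [hin, if_false]
      have hocc1 : ∀ q ∈ pvPatsL l, q.1 <:+: s.toList →
          (∃ u ∈ rs', q.1 = pvPatC u) ∧ pvRkp l q < f := by
        intro q hq hinf
        obtain ⟨⟨u, hu, hqu⟩, hrk⟩ := hocc q hq hinf
        rcases List.mem_cons.mp hu with rfl | hu'
        · exfalso
          apply hin
          rw [PySem.Str.isIn_iff_infix, pvPatS_toList, ← hqu]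
          exact hinf
        · exact ⟨⟨u, hu', hqu⟩, hrk⟩
      exact ih _ hnd.of_cons (fun u hu => hsub u (List.mem_cons_of_mem _ hu)) hwf hocc1

theorem pvFull_Ef {prompt : String} {l : List (String × String)} (h : pvH prompt l) :
    ∀ (f : Nat) (t : String), t ∈ pvKeys l → pvRkn l t < f →
      pvFull l f t = String.ofList (pvEf (pvPatsL l) (l.length + 1) (pvLookup l t).toList) := by
  intro f
  induction f with
  | zero => intro t _ hrk; omega
  | succ f ih =>
    intro t hk hrk
    rw [pvFull]
    have hkeysnd : (pvKeys l).Nodup := by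
      rw [pvH_keys h]
      exact h.1
    apply pvFold_Ef h (pvFull l f) f ih (pvKeys l) (pvLookup l t) hkeysnd (fun u hu => hu)
      (pvH_val_wf h hk)
    intro q hq hinf
    obtain ⟨u, hu, rfl⟩ := List.mem_map.mp hq
    refine ⟨⟨u, hu, rfl⟩, ?_⟩
    have hmemt := pvPats_mem h hk
    have hlt := pvH_G4 h _ _ hmemt hq hinf
    rw [pvRkp_pat, pvRkp_pat] at hlt
    rw [pvRkp_pat] at ⊢
    omega

-- ===== branch 1: no pattern occurs in the prompt =====
theorem pvBranch1 {prompt : String} {l : List (String × String)}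
    (h : ∀ p ∈ l, ¬ ('<' :: p.1.toList ++ ['>']) <:+: prompt.toList) :
    unroll_tag_stack prompt l = prompt ∧ unroll_tag_stack_alt prompt l = prompt := by
  have hnotin : ∀ k ∈ pvKeys l, PySem.Str.isIn (pvPatS k) prompt = false := by
    intro k hk
    have hk2 : k ∈ l.map Prod.fst := (PySem.List.mem_dedup ..).mp hk
    obtain ⟨p, hp, rfl⟩ := List.mem_map.mp hk2
    rw [← Bool.not_eq_true, PySem.Str.isIn_iff_infix, pvPatS_toList, pvPatC_def]
    exact h p hp
  constructor
  · unfold unroll_tag_stack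
    rw [pvLoopA]
    have hemp : (pvPresentTags (pvKeys l) prompt).isEmpty := by
      rw [List.isEmpty_iff, List.eq_nil_iff_forall_not_mem]
      intro t ht
      unfold pvPresentTags at ht
      rw [PySem.Set.mem_ofList, List.mem_filter] at ht
      rw [hnotin t ht.1] at ht
      exact absurd ht.2 (by simp)
    simp only [hemp, if_true]
  · unfold unroll_tag_stack_alt
    have : ∀ (rs : List String), (∀ u ∈ rs, u ∈ pvKeys l) →
        rs.foldl (fun s t => if PySem.Str.isIn (pvPatS t) s
          then PySem.Str.replace s (pvPatS t) (pvFull l (l.length + 1) t) else s) prompt = prompt := by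
      intro rs
      induction rs with
      | nil => intro _; rfl
      | cons u rs' ih =>
        intro hsub
        rw [List.foldl_cons, hnotin u (hsub u (List.mem_cons_self ..))]
        simp only [Bool.false_eq_true, if_false]
        exact ih (fun x hx => hsub x (List.mem_cons_of_mem _ hx))
    exact this (pvKeys l) (fun u hu => hu)

-- ===== VERDICT =====
theorem unroll_tag_stack_spec : Claim_equal_unroll_tag_stack := by
  intro prompt tag_stack _ hpre
  unfold Spec_unroll_tag_stack
  rcases hpre with h | h
  · have := pvBranch1 h
    rw [this.1, this.2]
  · have hB : pvH prompt tag_stack := h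
    have hwfp : PvWf prompt.toList := pvWfB_wf hB.2.2
    have hbnd : ∀ q ∈ pvPatsL tag_stack, q.1 <:+: prompt.toList →
        pvRkp tag_stack q < tag_stack.length + 1 :=
      fun q hq _ => pvH_G5 hB q hq
    have hA : unroll_tag_stack prompt tag_stack
        = String.ofList (pvEf (pvPatsL tag_stack) (tag_stack.length + 1) prompt.toList) := by
      unfold unroll_tag_stack
      exact pvLoopA_Ef hB _ prompt hwfp hbnd
    have hBeq : unroll_tag_stack_alt prompt tag_stack
        = String.ofList (pvEf (pvPatsL tag_stack) (tag_stack.length + 1) prompt.toList) := by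
      unfold unroll_tag_stack_alt
      apply pvFold_Ef hB (pvFull tag_stack (tag_stack.length + 1)) (tag_stack.length + 1)
        (fun u hu hrk => pvFull_Ef hB _ u hu hrk)
        (pvKeys tag_stack) prompt
        (by rw [pvH_keys hB]; exact hB.1) (fun u hu => hu) hwfp
      intro q hq hinf
      obtain ⟨u, hu, rfl⟩ := List.mem_map.mp hq
      exact ⟨⟨u, hu, rfl⟩, pvH_G5 hB _ (List.mem_map.mpr ⟨u, hu, rfl⟩)⟩
    rw [hA, hBeq]
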